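-- pv_equiv track=rewrite | github.com/mmfrenkel/brain-teasers | python_problems/problem10/main.py | _find_dictionary_of_chars
-- ===== SOURCE A (Python) =====
-- def _find_dictionary_of_chars(str1, str2):
--     char_dict = {}
--
--     for letter in str1:
--         if letter in char_dict.keys() and "str1" in char_dict[letter].keys():
--             char_dict[letter]["str1"] += 1
--         else:
--             new_dict = {"str1": 1}
--             char_dict[letter] = new_dict
--
--     for letter in str2:
--         if letter in char_dict.keys() and "str2" in char_dict[letter].keys():
--             char_dict[letter]["str2"] += 1
--         elif letter in char_dict.keys():
--             char_dict[letter].update({"str2": 1})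
--         else:
--             new_dict = {"str2": 1}
--             char_dict[letter] = new_dict
--
--     return char_dict
-- ===== SOURCE B (Python) =====
-- def _find_dictionary_of_chars(str1, str2):
--     # For each distinct character (first-appearance order via dict.fromkeys),
--     # obtain its total occurrences with str.count, instead of A's per-character
--     # incremental mutation of nested count dicts.
--     result = {}
--     for letter in dict.fromkeys(str1):
--         result[letter] = {"str1": str1.count(letter)}
--     for letter in dict.fromkeys(str2):
--         if letter in result:
--             result[letter]["str2"] = str2.count(letter)
--         else:
--             result[letter] = {"str2": str2.count(letter)}
--     return result
-- ===== Notes on version B (the rewrite author's own statement) =====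
-- stated objective: alternative
-- what changed: B iterates over the distinct characters of each string (dict.fromkeys order) and obtains each character's total with a str.count scan, instead of A's single pass that mutates nested count dicts per character.
import Mathlib
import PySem

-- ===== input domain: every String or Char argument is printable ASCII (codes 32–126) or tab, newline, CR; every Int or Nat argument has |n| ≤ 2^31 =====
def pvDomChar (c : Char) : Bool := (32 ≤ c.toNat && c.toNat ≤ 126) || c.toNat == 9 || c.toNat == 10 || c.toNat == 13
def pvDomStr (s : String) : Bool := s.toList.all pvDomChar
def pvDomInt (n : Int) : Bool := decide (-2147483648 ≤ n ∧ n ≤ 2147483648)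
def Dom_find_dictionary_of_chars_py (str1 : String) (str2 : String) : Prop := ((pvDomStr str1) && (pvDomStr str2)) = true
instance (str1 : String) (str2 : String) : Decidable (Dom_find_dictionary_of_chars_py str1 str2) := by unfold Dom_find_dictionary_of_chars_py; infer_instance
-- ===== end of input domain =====

-- B loops over the DISTINCT characters (first-appearance order) and obtains each total with a
-- str.count scan, instead of A's single pass mutating nested count dicts; objective: alternative.

-- ===== PORT A =====
-- first loop body of A: increment char_dict[letter]["str1"] or set char_dict[letter] = {"str1": 1}
def pvStepA1 (d : PySem.Dict String (PySem.Dict String Int)) (c : Char) :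
    PySem.Dict String (PySem.Dict String Int) :=
  let k := String.ofList [c]
  if d.contains k && (d.getD k PySem.Dict.empty).contains "str1" then
    d.insert k ((d.getD k PySem.Dict.empty).insert "str1"
      ((d.getD k PySem.Dict.empty).getD "str1" 0 + 1))
  else
    d.insert k (PySem.Dict.empty.insert "str1" 1)

-- second loop body of A
def pvStepA2 (d : PySem.Dict String (PySem.Dict String Int)) (c : Char) :
    PySem.Dict String (PySem.Dict String Int) :=
  let k := String.ofList [c]
  if d.contains k && (d.getD k PySem.Dict.empty).contains "str2" then
    d.insert k ((d.getD k PySem.Dict.empty).insert "str2"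
      ((d.getD k PySem.Dict.empty).getD "str2" 0 + 1))
  else if d.contains k then
    d.insert k ((d.getD k PySem.Dict.empty).insert "str2" 1)
  else
    d.insert k (PySem.Dict.empty.insert "str2" 1)

def find_dictionary_of_chars_py (str1 : String) (str2 : String) :
    List (String × List (String × Int)) :=
  let d1 := str1.toList.foldl pvStepA1 PySem.Dict.empty
  let d2 := str2.toList.foldl pvStepA2 d1
  d2.items.map (fun p => (p.1, p.2.items))

-- ===== PORT B =====
-- the characters of s as one-character strings (Python iterates a str yielding 1-char strs)
def pvKeyed (s : String) : List String := s.toList.map (fun c => String.ofList [c])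

def find_dictionary_of_chars_py_alt (str1 : String) (str2 : String) :
    List (String × List (String × Int)) :=
  let l1 := pvKeyed str1
  let l2 := pvKeyed str2
  -- for letter in dict.fromkeys(str1): result[letter] = {"str1": str1.count(letter)}
  let r1 := (PySem.List.dedup l1).foldl
    (fun r k => r.insert k (PySem.Dict.empty.insert "str1" (l1.count k : Int)))
    PySem.Dict.empty
  -- for letter in dict.fromkeys(str2): add/emit the "str2" count
  let r2 := (PySem.List.dedup l2).foldl
    (fun r k =>
      if r.contains k then
        r.insert k ((r.getD k PySem.Dict.empty).insert "str2" (l2.count k : Int))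
      else
        r.insert k (PySem.Dict.empty.insert "str2" (l2.count k : Int)))
    r1
  r2.items.map (fun p => (p.1, p.2.items))

-- ===== PRECONDITION & SPEC =====
def Spec_find_dictionary_of_chars_py (str1 : String) (str2 : String) (out : List (String × List (String × Int))) : Prop := out = find_dictionary_of_chars_py_alt str1 str2
instance (str1 : String) (str2 : String) (out : List (String × List (String × Int))) : Decidable (Spec_find_dictionary_of_chars_py str1 str2 out) := by unfold Spec_find_dictionary_of_chars_py; infer_instance

-- ===== CLAIM (what is proved, stated in full; the proofs are below) =====
def Claim_equal_find_dictionary_of_chars_py : Prop := ∀ (str1 : String) (str2 : String), Dom_find_dictionary_of_chars_py str1 str2 → Spec_find_dictionary_of_chars_py str1 str2 (find_dictionary_of_chars_py str1 str2)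

-- ===== LEMMAS AND PROOFS =====

-- counting step (proof-side): e[k] = e.get(k, 0) + 1
def pvBump (d : PySem.Dict String Int) (k : String) : PySem.Dict String Int :=
  d.insert k (d.getD k 0 + 1)

-- the state of A's first loop, as a function of a counter e
def pvRender1 (e : PySem.Dict String Int) : PySem.Dict String (PySem.Dict String Int) :=
  PySem.Dict.mk (e.items.map (fun p => (p.1, PySem.Dict.mk [("str1", p.2)])))

def pvTail : Option Int → List (String × Int)
  | some m => [("str2", m)]
  | none => []

-- the state of A's second loop: c1 = full counter of str1, e = counter so far of str2
def pvSeg1 (c1 e : PySem.Dict String Int) : List (String × PySem.Dict String Int) :=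
  c1.items.map (fun p => (p.1, PySem.Dict.mk (("str1", p.2) :: pvTail (e.get? p.1))))

def pvSeg2 (c1 e : PySem.Dict String Int) : List (String × PySem.Dict String Int) :=
  (e.items.filter (fun p => !(c1.contains p.1))).map (fun p => (p.1, PySem.Dict.mk [("str2", p.2)]))

def pvRender (c1 e : PySem.Dict String Int) : PySem.Dict String (PySem.Dict String Int) :=
  PySem.Dict.mk (pvSeg1 c1 e ++ pvSeg2 c1 e)

-- step function of B's second loop, phrased on counter items
def pvStepB2 (r : PySem.Dict String (PySem.Dict String Int)) (p : String × Int) :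
    PySem.Dict String (PySem.Dict String Int) :=
  if r.contains p.1 then
    r.insert p.1 ((r.getD p.1 PySem.Dict.empty).insert "str2" p.2)
  else
    r.insert p.1 (PySem.Dict.empty.insert "str2" p.2)

lemma pvEmptyIns (s : String) (v : Int) :
    (PySem.Dict.empty : PySem.Dict String Int).insert s v = PySem.Dict.mk [(s, v)] := by
  apply PySem.Dict.ext
  rw [PySem.Dict.items_insert_of_not_contains _ _ (by simp)]
  rfl

lemma pvMemContains {ν : Type} (d : PySem.Dict String ν) {p : String × ν} (hp : p ∈ d.items) :
    d.contains p.1 = true := by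
  simp only [PySem.Dict.contains, List.any_eq_true]
  exact ⟨p, hp, by simp⟩

lemma pvRender_keys (c1 e : PySem.Dict String Int) :
    (pvRender c1 e).keys = c1.keys ++ (e.items.filter (fun p => !(c1.contains p.1))).map (·.1) := by
  simp only [pvRender, pvSeg1, pvSeg2, PySem.Dict.keys_mk, List.map_append, List.map_map]
  rfl

lemma pvRender_nodup (c1 e : PySem.Dict String Int) (hc1 : c1.keys.Nodup) (he : e.keys.Nodup) :
    (pvRender c1 e).keys.Nodup := by
  rw [pvRender_keys, List.nodup_append]
  refine ⟨hc1, ?_, ?_⟩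
  · exact List.Sublist.nodup (List.Sublist.map _ (List.filter_sublist)) he
  · intro k hk b hb
    rcases List.mem_map.mp hb with ⟨p, hp, hpb⟩
    rcases List.mem_filter.mp hp with ⟨_, hpred⟩
    rw [Bool.not_eq_true'] at hpred
    intro hkb
    rw [hkb, ← hpb] at hk
    exact absurd ((PySem.Dict.contains_iff_mem_keys c1 p.1).mpr hk) (by simp [hpred])

lemma pvRender_contains (c1 e : PySem.Dict String Int) (k : String) :
    (pvRender c1 e).contains k = (c1.contains k || e.contains k) := by
  rw [Bool.eq_iff_iff, Bool.or_eq_true, PySem.Dict.contains_iff_mem_keys,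
    PySem.Dict.contains_iff_mem_keys, PySem.Dict.contains_iff_mem_keys, pvRender_keys]
  simp only [List.mem_append, List.mem_map, List.mem_filter]
  constructor
  · rintro (h | ⟨p, ⟨hp, _⟩, rfl⟩)
    · exact Or.inl h
    · exact Or.inr (List.mem_map.mpr ⟨p, hp, rfl⟩)
  · rintro (h | h)
    · exact Or.inl h
    · by_cases hc : k ∈ c1.keys
      · exact Or.inl hc
      · rcases List.mem_map.mp h with ⟨p, hp, rfl⟩
        refine Or.inr ⟨p, ⟨hp, ?_⟩, rfl⟩
        simp only [Bool.not_eq_true']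
        exact (Bool.not_eq_true _).mp (fun hcc => hc ((PySem.Dict.contains_iff_mem_keys c1 p.1).mp hcc))

lemma pvRender_get?_left (c1 e : PySem.Dict String Int) (hc1 : c1.keys.Nodup)
    (he : e.keys.Nodup) {k : String} {n : Int} (hn : c1.get? k = some n) :
    (pvRender c1 e).get? k = some (PySem.Dict.mk (("str1", n) :: pvTail (e.get? k))) := by
  have hmem : (k, n) ∈ c1.items := PySem.Dict.mem_items_of_get?_eq_some _ hn
  refine PySem.Dict.get?_of_mem_items _ ?_ (pvRender_nodup _ _ hc1 he)
  show _ ∈ pvSeg1 c1 e ++ pvSeg2 c1 e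
  exact List.mem_append_left _ (List.mem_map.mpr ⟨(k, n), hmem, rfl⟩)

lemma pvRender_get?_right (c1 e : PySem.Dict String Int) (hc1 : c1.keys.Nodup)
    (he : e.keys.Nodup) {k : String} {m : Int} (hck : c1.contains k = false)
    (hm : e.get? k = some m) :
    (pvRender c1 e).get? k = some (PySem.Dict.mk [("str2", m)]) := by
  have hmem : (k, m) ∈ e.items := PySem.Dict.mem_items_of_get?_eq_some _ hm
  refine PySem.Dict.get?_of_mem_items _ ?_ (pvRender_nodup _ _ hc1 he)
  show _ ∈ pvSeg1 c1 e ++ pvSeg2 c1 e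
  refine List.mem_append_right _ (List.mem_map.mpr ⟨(k, m), List.mem_filter.mpr ⟨hmem, ?_⟩, rfl⟩)
  simp [hck]

lemma pvSeg1_ow (c1 e : PySem.Dict String Int) (hc1 : c1.keys.Nodup) {k : String} {n : Int}
    (hn : c1.get? k = some n) (v : Int) :
    (pvSeg1 c1 e).map (fun q => if q.1 == k then (k, PySem.Dict.mk [("str1", n), ("str2", v)]) else q)
      = pvSeg1 c1 (e.insert k v) := by
  simp only [pvSeg1, List.map_map]
  apply List.map_congr_left
  intro p hp
  by_cases hpk : p.1 = k
  · have hp' : (p.1, p.2) ∈ c1.items := by simpa using hp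
    have hp2 : p.2 = n := by
      have h := PySem.Dict.get?_of_mem_items c1 hp' hc1
      rw [hpk, hn] at h
      exact (Option.some.inj h).symm
    simp [Function.comp, hpk, hp2, PySem.Dict.get?_insert_self, pvTail]
  · simp [Function.comp, hpk, PySem.Dict.get?_insert_of_ne _ _ hpk]

lemma pvSeg1_map_id (c1 e : PySem.Dict String Int) {k : String}
    (hck : c1.contains k = false) (w : PySem.Dict String Int) :
    (pvSeg1 c1 e).map (fun q => if q.1 == k then (k, w) else q) = pvSeg1 c1 e := by
  have h : ∀ q ∈ pvSeg1 c1 e, (fun q => if q.1 == k then (k, w) else q) q = id q := by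
    intro q hq
    rcases List.mem_map.mp hq with ⟨p, hp, hpq⟩
    have hne : q.1 ≠ k := by
      rw [← hpq]
      intro hpk
      rw [← hpk] at hck
      exact absurd (pvMemContains c1 hp) (by simp [hck])
    simp [hne]
  rw [List.map_congr_left h, List.map_id]

lemma pvSeg1_insert_of_not_c1 (c1 e : PySem.Dict String Int) {k : String}
    (hck : c1.contains k = false) (v : Int) :
    pvSeg1 c1 (e.insert k v) = pvSeg1 c1 e := by
  simp only [pvSeg1]
  apply List.map_congr_left
  intro p hp
  have hne : p.1 ≠ k := by
    intro hpk
    rw [← hpk] at hck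
    exact absurd (pvMemContains c1 hp) (by simp [hck])
  rw [PySem.Dict.get?_insert_of_ne _ _ hne]

lemma pvSeg2_map_id (c1 e : PySem.Dict String Int) {k : String}
    (hcc : c1.contains k = true) (w : PySem.Dict String Int) :
    (pvSeg2 c1 e).map (fun q => if q.1 == k then (k, w) else q) = pvSeg2 c1 e := by
  have h : ∀ q ∈ pvSeg2 c1 e, (fun q => if q.1 == k then (k, w) else q) q = id q := by
    intro q hq
    rcases List.mem_map.mp hq with ⟨p, hp, hpq⟩
    rcases List.mem_filter.mp hp with ⟨_, hpred⟩
    rw [Bool.not_eq_true'] at hpred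
    have hne : q.1 ≠ k := by
      rw [← hpq]
      intro hpk
      rw [hpk, hcc] at hpred
      exact Bool.true_eq_false.mp hpred
    simp [hne]
  rw [List.map_congr_left h, List.map_id]

lemma pvSeg2_insert_of_c1 (c1 e : PySem.Dict String Int) {k : String}
    (hcc : c1.contains k = true) (v : Int) :
    pvSeg2 c1 (e.insert k v) = pvSeg2 c1 e := by
  simp only [pvSeg2, PySem.Dict.items_insert]
  by_cases hek : e.contains k = true
  · rw [if_pos hek, List.filter_map]
    have hfc : e.items.filter ((fun p => !c1.contains p.1) ∘ fun p => if p.1 == k then (k, v) else p)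
        = e.items.filter (fun p => !c1.contains p.1) := by
      apply List.filter_congr
      intro p hp
      by_cases hpk : p.1 = k
      · simp [Function.comp, hpk, hcc]
      · simp [Function.comp, hpk]
    rw [hfc, List.map_map]
    apply List.map_congr_left
    intro p hp
    rcases List.mem_filter.mp hp with ⟨_, hpred⟩
    rw [Bool.not_eq_true'] at hpred
    have hne : p.1 ≠ k := by
      intro hpk
      rw [hpk, hcc] at hpred
      exact Bool.true_eq_false.mp hpred
    simp [Function.comp, hne]
  · rw [if_neg hek, List.filter_append]
    have : [(k, v)].filter (fun p => !c1.contains p.1) = [] := by simp [hcc]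
    rw [this, List.append_nil]

lemma pvSeg2_ow_right (c1 e : PySem.Dict String Int) {k : String}
    (hck : c1.contains k = false) (hek : e.contains k = true) (v : Int) :
    (pvSeg2 c1 e).map
        (fun q => if q.1 == k then (k, PySem.Dict.mk [("str2", v)]) else q)
      = pvSeg2 c1 (e.insert k v) := by
  simp only [pvSeg2, PySem.Dict.items_insert_of_contains _ _ hek, List.filter_map, List.map_map]
  have hfc : e.items.filter ((fun p => !c1.contains p.1) ∘ fun p => if p.1 == k then (k, v) else p)
      = e.items.filter (fun p => !c1.contains p.1) := by
    apply List.filter_congr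
    intro p hp
    by_cases hpk : p.1 = k
    · simp [Function.comp, hpk, hck]
    · simp [Function.comp, hpk]
  rw [hfc]
  apply List.map_congr_left
  intro p hp
  by_cases hpk : p.1 = k
  · simp [Function.comp, hpk]
  · simp [Function.comp, hpk]

lemma pvIns_left (c1 e : PySem.Dict String Int) (hc1 : c1.keys.Nodup)
    {k : String} {n : Int} (hn : c1.get? k = some n) (v : Int) :
    (pvRender c1 e).insert k (PySem.Dict.mk [("str1", n), ("str2", v)])
      = pvRender c1 (e.insert k v) := by
  have hcc : c1.contains k = true := by
    rw [PySem.Dict.contains_eq_isSome_get?, hn]; rfl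
  apply PySem.Dict.ext
  rw [PySem.Dict.items_insert_of_contains _ _ (by rw [pvRender_contains, hcc]; rfl)]
  show (pvSeg1 c1 e ++ pvSeg2 c1 e).map _ = pvSeg1 c1 (e.insert k v) ++ pvSeg2 c1 (e.insert k v)
  rw [List.map_append, pvSeg1_ow c1 e hc1 hn v, pvSeg2_map_id c1 e hcc, pvSeg2_insert_of_c1 c1 e hcc v]

lemma pvIns_right_old (c1 e : PySem.Dict String Int)
    {k : String} (hck : c1.contains k = false) (hek : e.contains k = true) (v : Int) :
    (pvRender c1 e).insert k (PySem.Dict.mk [("str2", v)])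
      = pvRender c1 (e.insert k v) := by
  apply PySem.Dict.ext
  rw [PySem.Dict.items_insert_of_contains _ _ (by rw [pvRender_contains, hck, hek]; rfl)]
  show (pvSeg1 c1 e ++ pvSeg2 c1 e).map _ = pvSeg1 c1 (e.insert k v) ++ pvSeg2 c1 (e.insert k v)
  rw [List.map_append, pvSeg1_map_id c1 e hck, pvSeg1_insert_of_not_c1 c1 e hck v,
    pvSeg2_ow_right c1 e hck hek v]

lemma pvIns_right_new (c1 e : PySem.Dict String Int)
    {k : String} (hck : c1.contains k = false) (hek : e.contains k = false) (v : Int) :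
    (pvRender c1 e).insert k (PySem.Dict.mk [("str2", v)])
      = pvRender c1 (e.insert k v) := by
  apply PySem.Dict.ext
  rw [PySem.Dict.items_insert_of_not_contains _ _ (by rw [pvRender_contains, hck, hek]; rfl)]
  show (pvSeg1 c1 e ++ pvSeg2 c1 e) ++ [(k, PySem.Dict.mk [("str2", v)])]
      = pvSeg1 c1 (e.insert k v) ++ pvSeg2 c1 (e.insert k v)
  rw [pvSeg1_insert_of_not_c1 c1 e hck v]
  have hseg2 : pvSeg2 c1 (e.insert k v) = pvSeg2 c1 e ++ [(k, PySem.Dict.mk [("str2", v)])] := by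
    simp only [pvSeg2, PySem.Dict.items_insert_of_not_contains _ _ hek, List.filter_append,
      List.map_append]
    have : [(k, v)].filter (fun p => !c1.contains p.1) = [(k, v)] := by simp [hck]
    rw [this]
    rfl
  rw [hseg2, List.append_assoc]

lemma pvLitC_s2_2 (n m : Int) : (PySem.Dict.mk [("str1", n), ("str2", m)]).contains "str2" = true := by
  simp [PySem.Dict.contains]

lemma pvLitC_s2_1 (n : Int) : (PySem.Dict.mk [("str1", n)]).contains "str2" = false := by
  simp [PySem.Dict.contains]

lemma pvLitC_s2_1' (m : Int) : (PySem.Dict.mk [("str2", m)]).contains "str2" = true := by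
  simp [PySem.Dict.contains]

lemma pvLitC_s1_1 (n : Int) : (PySem.Dict.mk [("str1", n)]).contains "str1" = true := by
  simp [PySem.Dict.contains]

lemma pvLitG_s2_2 (n m : Int) : (PySem.Dict.mk [("str1", n), ("str2", m)]).getD "str2" 0 = m := by
  simp [PySem.Dict.getD_eq_get?_getD, PySem.Dict.get?]

lemma pvLitG_s2_1' (m : Int) : (PySem.Dict.mk [("str2", m)]).getD "str2" 0 = m := by
  simp [PySem.Dict.getD_eq_get?_getD, PySem.Dict.get?]

lemma pvLitG_s1_1 (n : Int) : (PySem.Dict.mk [("str1", n)]).getD "str1" 0 = n := by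
  simp [PySem.Dict.getD_eq_get?_getD, PySem.Dict.get?]

lemma pvLitI_s2_2 (n m v : Int) :
    (PySem.Dict.mk [("str1", n), ("str2", m)]).insert "str2" v
      = PySem.Dict.mk [("str1", n), ("str2", v)] := by
  apply PySem.Dict.ext
  rw [PySem.Dict.items_insert_of_contains _ _ (pvLitC_s2_2 n m)]
  simp

lemma pvLitI_s2_1 (n v : Int) :
    (PySem.Dict.mk [("str1", n)]).insert "str2" v = PySem.Dict.mk [("str1", n), ("str2", v)] := by
  apply PySem.Dict.ext
  rw [PySem.Dict.items_insert_of_not_contains _ _ (pvLitC_s2_1 n)]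
  rfl

lemma pvLitI_s2_1' (m v : Int) :
    (PySem.Dict.mk [("str2", m)]).insert "str2" v = PySem.Dict.mk [("str2", v)] := by
  apply PySem.Dict.ext
  rw [PySem.Dict.items_insert_of_contains _ _ (pvLitC_s2_1' m)]
  simp

lemma pvLitI_s1_1 (n v : Int) :
    (PySem.Dict.mk [("str1", n)]).insert "str1" v = PySem.Dict.mk [("str1", v)] := by
  apply PySem.Dict.ext
  rw [PySem.Dict.items_insert_of_contains _ _ (pvLitC_s1_1 n)]
  simp

lemma pvStepA2_render (c1 e : PySem.Dict String Int) (hc1 : c1.keys.Nodup)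
    (he : e.keys.Nodup) (c : Char) :
    pvStepA2 (pvRender c1 e) c = pvRender c1 (pvBump e (String.ofList [c])) := by
  simp only [pvStepA2, pvBump]
  cases hcg : c1.get? (String.ofList [c]) with
  | some n =>
    have hcc : c1.contains (String.ofList [c]) = true := by
      rw [PySem.Dict.contains_eq_isSome_get?, hcg]; rfl
    have hrc : (pvRender c1 e).contains (String.ofList [c]) = true := by
      rw [pvRender_contains, hcc]; rfl
    cases heg : e.get? (String.ofList [c]) with
    | some m =>
      have hge := pvRender_get?_left c1 e hc1 he hcg
      rw [heg] at hge
      have hgd : (pvRender c1 e).getD (String.ofList [c]) PySem.Dict.empty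
          = PySem.Dict.mk [("str1", n), ("str2", m)] := by
        rw [PySem.Dict.getD_eq_get?_getD, hge]; rfl
      have hed : e.getD (String.ofList [c]) 0 = m := by
        rw [PySem.Dict.getD_eq_get?_getD, heg]; rfl
      rw [hgd, hrc, hed, pvLitC_s2_2, pvLitG_s2_2, pvLitI_s2_2]
      simp only [Bool.and_self, if_pos]
      exact pvIns_left c1 e hc1 hcg (m + 1)
    | none =>
      have hge := pvRender_get?_left c1 e hc1 he hcg
      rw [heg] at hge
      have hgd : (pvRender c1 e).getD (String.ofList [c]) PySem.Dict.empty
          = PySem.Dict.mk [("str1", n)] := by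
        rw [PySem.Dict.getD_eq_get?_getD, hge]; rfl
      have hed : e.getD (String.ofList [c]) 0 = 0 := by
        rw [PySem.Dict.getD_eq_get?_getD, heg]; rfl
      rw [hgd, hrc, hed, pvLitC_s2_1, pvLitI_s2_1]
      simp only [Bool.and_false, Bool.false_eq_true, if_neg, if_pos, not_false_eq_true]
      rw [show (0 : Int) + 1 = 1 from rfl]
      exact pvIns_left c1 e hc1 hcg 1
  | none =>
    have hcc : c1.contains (String.ofList [c]) = false := by
      rw [PySem.Dict.contains_eq_isSome_get?, hcg]; rfl
    cases heg : e.get? (String.ofList [c]) with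
    | some m =>
      have hek : e.contains (String.ofList [c]) = true := by
        rw [PySem.Dict.contains_eq_isSome_get?, heg]; rfl
      have hrc : (pvRender c1 e).contains (String.ofList [c]) = true := by
        rw [pvRender_contains, hcc, hek]; rfl
      have hge := pvRender_get?_right c1 e hc1 he hcc heg
      have hgd : (pvRender c1 e).getD (String.ofList [c]) PySem.Dict.empty
          = PySem.Dict.mk [("str2", m)] := by
        rw [PySem.Dict.getD_eq_get?_getD, hge]; rfl
      have hed : e.getD (String.ofList [c]) 0 = m := by
        rw [PySem.Dict.getD_eq_get?_getD, heg]; rfl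
      rw [hgd, hrc, hed, pvLitC_s2_1', pvLitG_s2_1', pvLitI_s2_1']
      simp only [Bool.and_self, if_pos]
      exact pvIns_right_old c1 e hcc hek (m + 1)
    | none =>
      have hek : e.contains (String.ofList [c]) = false := by
        rw [PySem.Dict.contains_eq_isSome_get?, heg]; rfl
      have hrc : (pvRender c1 e).contains (String.ofList [c]) = false := by
        rw [pvRender_contains, hcc, hek]; rfl
      have hed : e.getD (String.ofList [c]) 0 = 0 := by
        rw [PySem.Dict.getD_eq_get?_getD, heg]; rfl
      rw [hrc, hed, pvEmptyIns]
      simp only [Bool.false_and, Bool.false_eq_true, if_neg, not_false_eq_true]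
      rw [show (0 : Int) + 1 = 1 from rfl]
      exact pvIns_right_new c1 e hcc hek 1

lemma pvStepB2_render (c1 e : PySem.Dict String Int) (hc1 : c1.keys.Nodup)
    (he : e.keys.Nodup) (p : String × Int) (hp : e.contains p.1 = false) :
    pvStepB2 (pvRender c1 e) p = pvRender c1 (e.insert p.1 p.2) := by
  simp only [pvStepB2]
  have heg : e.get? p.1 = none := (PySem.Dict.get?_eq_none_iff_contains e p.1).mpr hp
  cases hcg : c1.get? p.1 with
  | some n =>
    have hcc : c1.contains p.1 = true := by
      rw [PySem.Dict.contains_eq_isSome_get?, hcg]; rfl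
    have hrc : (pvRender c1 e).contains p.1 = true := by
      rw [pvRender_contains, hcc]; rfl
    have hge := pvRender_get?_left c1 e hc1 he hcg
    rw [heg] at hge
    have hgd : (pvRender c1 e).getD p.1 PySem.Dict.empty = PySem.Dict.mk [("str1", n)] := by
      rw [PySem.Dict.getD_eq_get?_getD, hge]; rfl
    rw [hgd, hrc, pvLitI_s2_1]
    simp only [if_pos]
    exact pvIns_left c1 e hc1 hcg p.2
  | none =>
    have hcc : c1.contains p.1 = false := by
      rw [PySem.Dict.contains_eq_isSome_get?, hcg]; rfl
    have hrc : (pvRender c1 e).contains p.1 = false := by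
      rw [pvRender_contains, hcc, hp]; rfl
    rw [hrc, pvEmptyIns]
    simp only [Bool.false_eq_true, if_neg, not_false_eq_true]
    exact pvIns_right_new c1 e hcc hp p.2

lemma pvRender1_keys (e : PySem.Dict String Int) : (pvRender1 e).keys = e.keys := by
  simp only [pvRender1, PySem.Dict.keys_mk, List.map_map]
  rfl

lemma pvRender1_get? (e : PySem.Dict String Int) (he : e.keys.Nodup) {k : String} {n : Int}
    (hn : e.get? k = some n) :
    (pvRender1 e).get? k = some (PySem.Dict.mk [("str1", n)]) := by
  have hmem : (k, n) ∈ e.items := PySem.Dict.mem_items_of_get?_eq_some _ hn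
  refine PySem.Dict.get?_of_mem_items _ ?_ (by rw [pvRender1_keys]; exact he)
  show _ ∈ (e.items.map (fun p => (p.1, PySem.Dict.mk [("str1", p.2)])))
  exact List.mem_map.mpr ⟨(k, n), hmem, rfl⟩

lemma pvRender1_contains (e : PySem.Dict String Int) (k : String) :
    (pvRender1 e).contains k = e.contains k := by
  rw [Bool.eq_iff_iff, PySem.Dict.contains_iff_mem_keys, PySem.Dict.contains_iff_mem_keys,
    pvRender1_keys]

lemma pvRender1_ins_old (e : PySem.Dict String Int) {k : String}
    (hek : e.contains k = true) (v : Int) :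
    (pvRender1 e).insert k (PySem.Dict.mk [("str1", v)]) = pvRender1 (e.insert k v) := by
  apply PySem.Dict.ext
  rw [PySem.Dict.items_insert_of_contains _ _ (by rw [pvRender1_contains]; exact hek)]
  show _ = (e.insert k v).items.map _
  rw [PySem.Dict.items_insert_of_contains _ _ hek]
  show ((e.items.map _).map _) = _
  rw [List.map_map, List.map_map]
  apply List.map_congr_left
  intro p _
  by_cases hpk : p.1 = k
  · simp [Function.comp, hpk]
  · simp [Function.comp, hpk]

lemma pvRender1_ins_new (e : PySem.Dict String Int) {k : String}
    (hek : e.contains k = false) (v : Int) :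
    (pvRender1 e).insert k (PySem.Dict.mk [("str1", v)]) = pvRender1 (e.insert k v) := by
  apply PySem.Dict.ext
  rw [PySem.Dict.items_insert_of_not_contains _ _ (by rw [pvRender1_contains]; exact hek)]
  show _ = (e.insert k v).items.map _
  rw [PySem.Dict.items_insert_of_not_contains _ _ hek]
  simp [pvRender1]

lemma pvStepA1_render (e : PySem.Dict String Int) (he : e.keys.Nodup) (c : Char) :
    pvStepA1 (pvRender1 e) c = pvRender1 (pvBump e (String.ofList [c])) := by
  simp only [pvStepA1, pvBump]
  cases heg : e.get? (String.ofList [c]) with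
  | some n =>
    have hek : e.contains (String.ofList [c]) = true := by
      rw [PySem.Dict.contains_eq_isSome_get?, heg]; rfl
    have hrc : (pvRender1 e).contains (String.ofList [c]) = true := by
      rw [pvRender1_contains]; exact hek
    have hgd : (pvRender1 e).getD (String.ofList [c]) PySem.Dict.empty
        = PySem.Dict.mk [("str1", n)] := by
      rw [PySem.Dict.getD_eq_get?_getD, pvRender1_get? e he heg]; rfl
    have hed : e.getD (String.ofList [c]) 0 = n := by
      rw [PySem.Dict.getD_eq_get?_getD, heg]; rfl
    rw [hgd, hrc, hed, pvLitC_s1_1, pvLitG_s1_1, pvLitI_s1_1]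
    simp only [Bool.and_self, if_pos]
    exact pvRender1_ins_old e hek (n + 1)
  | none =>
    have hek : e.contains (String.ofList [c]) = false := by
      rw [PySem.Dict.contains_eq_isSome_get?, heg]; rfl
    have hrc : (pvRender1 e).contains (String.ofList [c]) = false := by
      rw [pvRender1_contains]; exact hek
    have hed : e.getD (String.ofList [c]) 0 = 0 := by
      rw [PySem.Dict.getD_eq_get?_getD, heg]; rfl
    rw [hrc, hed, pvEmptyIns]
    simp only [Bool.false_and, Bool.false_eq_true, if_neg, not_false_eq_true]
    rw [show (0 : Int) + 1 = 1 from rfl]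
    exact pvRender1_ins_new e hek 1

lemma pvBump_nodup (e : PySem.Dict String Int) (he : e.keys.Nodup) (k : String) :
    (pvBump e k).keys.Nodup := by
  simpa [pvBump] using PySem.Dict.nodup_keys_insert e k (e.getD k 0 + 1) he

lemma pvA1gen (l : List Char) : ∀ (e : PySem.Dict String Int), e.keys.Nodup →
    l.foldl pvStepA1 (pvRender1 e) = pvRender1 (l.foldl (fun e c => pvBump e (String.ofList [c])) e) := by
  induction l with
  | nil => intro e he; rfl
  | cons c l ih =>
      intro e he
      simp only [List.foldl_cons, pvStepA1_render e he c]
      exact ih (pvBump e (String.ofList [c])) (pvBump_nodup e he _)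

lemma pvA2gen (c1 : PySem.Dict String Int) (hc1 : c1.keys.Nodup) (l : List Char) :
    ∀ (e : PySem.Dict String Int), e.keys.Nodup →
    l.foldl pvStepA2 (pvRender c1 e) = pvRender c1 (l.foldl (fun e c => pvBump e (String.ofList [c])) e) := by
  induction l with
  | nil => intro e he; rfl
  | cons c l ih =>
      intro e he
      simp only [List.foldl_cons, pvStepA2_render c1 e hc1 he c]
      exact ih (pvBump e (String.ofList [c])) (pvBump_nodup e he _)

lemma pvB2gen (c1 : PySem.Dict String Int) (hc1 : c1.keys.Nodup) (P : List (String × Int)) :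
    ∀ (e : PySem.Dict String Int), e.keys.Nodup → (∀ p ∈ P, e.contains p.1 = false) →
    (P.map (·.1)).Nodup →
    P.foldl pvStepB2 (pvRender c1 e) = pvRender c1 (P.foldl (fun e p => e.insert p.1 p.2) e) := by
  induction P with
  | nil => intro e _ _ _; rfl
  | cons p P ih =>
      intro e he hfresh hnd
      simp only [List.foldl_cons,
        pvStepB2_render c1 e hc1 he p (hfresh p (List.mem_cons_self))]
      rw [List.map_cons] at hnd
      rcases List.nodup_cons.mp hnd with ⟨hnotin, hnd'⟩
      refine ih (e.insert p.1 p.2) (PySem.Dict.nodup_keys_insert _ _ _ he) ?_ hnd'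
      intro q hq
      rw [PySem.Dict.contains_insert]
      have hqp : q.1 ≠ p.1 := by
        intro h
        exact hnotin (h ▸ List.mem_map.mpr ⟨q, hq, rfl⟩)
      simp [hqp, hfresh q (List.mem_cons_of_mem _ hq)]

-- the bump fold IS Counter(ls)
lemma pvBumpFold_eq_counter (ls : List String) :
    ls.foldl pvBump PySem.Dict.empty = PySem.Dict.counter ls := by
  rw [← PySem.Dict.foldl_insert_getD_add_one_eq_counter]
  rfl

lemma pvRender1_empty : pvRender1 PySem.Dict.empty = PySem.Dict.empty := by
  apply PySem.Dict.ext
  rfl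

lemma pvRender1_eq_render (c1 : PySem.Dict String Int) :
    pvRender1 c1 = pvRender c1 PySem.Dict.empty := by
  apply PySem.Dict.ext
  show _ = pvSeg1 c1 PySem.Dict.empty ++ pvSeg2 c1 PySem.Dict.empty
  simp [pvRender1, pvSeg1, pvSeg2, PySem.Dict.get?, pvTail, PySem.Dict.empty]

lemma pvB1 (c1 : PySem.Dict String Int) (hc1 : c1.keys.Nodup) :
    c1.items.foldl (fun r p => r.insert p.1 (PySem.Dict.empty.insert "str1" p.2))
      PySem.Dict.empty = pvRender1 c1 := by
  apply PySem.Dict.ext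
  rw [PySem.Dict.items_foldl_insert_fresh c1.items (fun p => p.1)
    (fun p => PySem.Dict.empty.insert "str1" p.2) PySem.Dict.empty
    (fun a _ => by simp) hc1]
  simp only [pvEmptyIns, pvRender1]
  rw [show (PySem.Dict.empty : PySem.Dict String (PySem.Dict String Int)).items = [] from rfl,
    List.nil_append]

lemma pvSelfInsert (c2 : PySem.Dict String Int) (hc2 : c2.keys.Nodup) :
    c2.items.foldl (fun e p => e.insert p.1 p.2) PySem.Dict.empty = c2 := by
  apply PySem.Dict.ext
  rw [PySem.Dict.items_foldl_insert_fresh c2.items (fun p => p.1) (fun p => p.2)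
    PySem.Dict.empty (fun a _ => by simp) hc2]
  rw [show (PySem.Dict.empty : PySem.Dict String Int).items = [] from rfl,
    List.nil_append]
  simp

-- B's fold over the deduped characters is the fold over the counter's items
lemma pvDedupFold1 (ls : List String) :
    (PySem.List.dedup ls).foldl
        (fun r k => r.insert k (PySem.Dict.empty.insert "str1" (ls.count k : Int)))
        PySem.Dict.empty
      = (PySem.Dict.counter ls).items.foldl
        (fun r p => r.insert p.1 (PySem.Dict.empty.insert "str1" p.2)) PySem.Dict.empty := by
  rw [PySem.Dict.items_counter, List.foldl_map, PySem.List.dedup_eq_ofList]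

lemma pvDedupFold2 (ls : List String) (r0 : PySem.Dict String (PySem.Dict String Int)) :
    (PySem.List.dedup ls).foldl
        (fun r k =>
          if r.contains k then
            r.insert k ((r.getD k PySem.Dict.empty).insert "str2" (ls.count k : Int))
          else
            r.insert k (PySem.Dict.empty.insert "str2" (ls.count k : Int))) r0
      = (PySem.Dict.counter ls).items.foldl pvStepB2 r0 := by
  rw [PySem.Dict.items_counter, List.foldl_map, PySem.List.dedup_eq_ofList]
  rfl

-- ===== VERDICT (by name: the statement is the Claim_ definition above) =====
theorem find_dictionary_of_chars_py_spec : Claim_equal_find_dictionary_of_chars_py := by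
  intro str1 str2 _
  show find_dictionary_of_chars_py str1 str2 = find_dictionary_of_chars_py_alt str1 str2
  unfold find_dictionary_of_chars_py find_dictionary_of_chars_py_alt
  have hc1 : (PySem.Dict.counter (pvKeyed str1) : PySem.Dict String Int).keys.Nodup :=
    PySem.Dict.nodup_keys_counter _
  have hc2 : (PySem.Dict.counter (pvKeyed str2) : PySem.Dict String Int).keys.Nodup :=
    PySem.Dict.nodup_keys_counter _
  have hA1 : str1.toList.foldl pvStepA1 PySem.Dict.empty
      = pvRender1 (PySem.Dict.counter (pvKeyed str1)) := by
    have h := pvA1gen str1.toList PySem.Dict.empty (by simp [PySem.Dict.keys, PySem.Dict.empty])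
    rw [pvRender1_empty] at h
    rw [h, ← List.foldl_map]
    rw [show str1.toList.map (fun c => String.ofList [c]) = pvKeyed str1 from rfl,
      pvBumpFold_eq_counter]
  have hA2 : str2.toList.foldl pvStepA2 (pvRender1 (PySem.Dict.counter (pvKeyed str1)))
      = pvRender (PySem.Dict.counter (pvKeyed str1)) (PySem.Dict.counter (pvKeyed str2)) := by
    rw [pvRender1_eq_render]
    rw [pvA2gen _ hc1 str2.toList PySem.Dict.empty (by simp [PySem.Dict.keys, PySem.Dict.empty])]
    rw [← List.foldl_map]
    rw [show str2.toList.map (fun c => String.ofList [c]) = pvKeyed str2 from rfl,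
      pvBumpFold_eq_counter]
  have hB2 : (PySem.Dict.counter (pvKeyed str2)).items.foldl pvStepB2
        (pvRender1 (PySem.Dict.counter (pvKeyed str1)))
      = pvRender (PySem.Dict.counter (pvKeyed str1)) (PySem.Dict.counter (pvKeyed str2)) := by
    rw [pvRender1_eq_render]
    rw [pvB2gen _ hc1 _ PySem.Dict.empty (by simp [PySem.Dict.keys, PySem.Dict.empty])
      (by intro p _; simp [PySem.Dict.contains, PySem.Dict.empty]) hc2]
    rw [pvSelfInsert _ hc2]
  simp only [hA1, hA2, pvDedupFold1, pvB1 _ hc1, pvDedupFold2, hB2]
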